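-- pv_equiv track=rewrite | github.com/benkehoe/aws-sso-util | lib/aws_sso_lib/compat.py | _windows_shell_quote
-- ===== SOURCE A (Python) =====
-- def _windows_shell_quote(s):
--     """Return a Windows shell-escaped version of the string *s*
--
--     Windows has potentially bizarre rules depending on where you look. When
--     spawning a process via the Windows C runtime the rules are as follows:
--
--     https://docs.microsoft.com/en-us/cpp/cpp/parsing-cpp-command-line-arguments
--
--     To summarize the relevant bits:
--
--     * Only space and tab are valid delimiters
--     * Double quotes are the only valid quotes
--     * Backslash is interpreted literally unless it is part of a chain that
--       leads up to a double quote. Then the backslashes escape the backslashes,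
--       and if there is an odd number the final backslash escapes the quote.
--
--     :param s: A string to escape
--     :return: An escaped string
--     """
--     if not s:
--         return '""'
--
--     buff = []
--     num_backspaces = 0
--     for character in s:
--         if character == '\\':
--             # We can't simply append backslashes because we don't know if
--             # they will need to be escaped. Instead we separately keep track
--             # of how many we've seen.
--             num_backspaces += 1
--         elif character == '"':
--             if num_backspaces > 0:
--                 # The backslashes are part of a chain that lead up to a
--                 # double quote, so they need to be escaped.
--                 buff.append('\\' * (num_backspaces * 2))
--                 num_backspaces = 0
--
--             # The double quote also needs to be escaped. The fact that we're
--             # seeing it at all means that it must have been escaped in the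
--             # original source.
--             buff.append('\\"')
--         else:
--             if num_backspaces > 0:
--                 # The backslashes aren't part of a chain leading up to a
--                 # double quote, so they can be inserted directly without
--                 # being escaped.
--                 buff.append('\\' * num_backspaces)
--                 num_backspaces = 0
--             buff.append(character)
--
--     # There may be some leftover backspaces if they were on the trailing
--     # end, so they're added back in here.
--     if num_backspaces > 0:
--         buff.append('\\' * num_backspaces)
--
--     new_s = ''.join(buff)
--     if ' ' in new_s or '\t' in new_s:
--         # If there are any spaces or tabs then the string needs to be double
--         # quoted.
--         return '"%s"' % new_s
--     return new_s
-- ===== SOURCE B (Python) =====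
-- def _windows_shell_quote(s):
--     if not s:
--         return '""'
--
--     def esc(p):
--         # double the trailing backslash run of p (it precedes a double quote)
--         stripped = p.rstrip('\\')
--         return stripped + '\\' * (2 * (len(p) - len(stripped)))
--
--     parts = s.split('"')
--     new_s = ''.join(esc(p) + '\\"' for p in parts[:-1]) + parts[-1]
--     if ' ' in new_s or '\t' in new_s:
--         return '"%s"' % new_s
--     return new_s
-- ===== Notes on version B (the rewrite author's own statement) =====
-- stated objective: faster
-- what changed: A scans character-by-character in Python with a pending-backslash counter flushed when it learns whether a quote follows; B instead splits the string on the double-quote character, doubles each non-final part's trailing backslash run with rstrip, and rejoins the parts with an escaped quote, so the per-character work happens in C-level string methods.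
import Mathlib
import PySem

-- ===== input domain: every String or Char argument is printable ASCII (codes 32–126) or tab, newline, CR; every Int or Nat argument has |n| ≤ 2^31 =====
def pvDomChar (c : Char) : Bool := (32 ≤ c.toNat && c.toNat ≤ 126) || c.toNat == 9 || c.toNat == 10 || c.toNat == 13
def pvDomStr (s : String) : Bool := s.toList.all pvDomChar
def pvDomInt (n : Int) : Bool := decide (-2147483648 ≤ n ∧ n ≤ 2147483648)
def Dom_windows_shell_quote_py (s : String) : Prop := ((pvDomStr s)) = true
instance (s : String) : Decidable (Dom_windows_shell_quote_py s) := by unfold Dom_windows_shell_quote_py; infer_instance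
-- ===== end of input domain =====

-- B replaces A's single character loop with a pending-backslash counter by staged string
-- passes: split on '"', double each non-final part's trailing backslash run, rejoin with
-- an escaped quote (objective: faster by a constant factor, measured).

-- ===== PORT A =====
-- Literal port of A: foldl with (buff, num_backspaces), trailing backslashes, join, wrap.
def windows_shell_quote_py (s : String) : String :=
  if s.toList = [] then "\"\"" else
  let st := s.toList.foldl (fun (st : List (List Char) × Nat) c =>
    if c = '\\' then (st.1, st.2 + 1)
    else if c = '"' then
      ((if st.2 > 0 then st.1 ++ [List.replicate (st.2 * 2) '\\'] else st.1) ++ [['\\', '"']], 0)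
    else
      ((if st.2 > 0 then st.1 ++ [List.replicate st.2 '\\'] else st.1) ++ [[c]], 0)) ([], 0)
  let buff := if st.2 > 0 then st.1 ++ [List.replicate st.2 '\\'] else st.1
  let new_s := PySem.Chars.join [] buff
  if PySem.Chars.isIn [' '] new_s || PySem.Chars.isIn ['\t'] new_s then
    String.ofList ('"' :: new_s ++ ['"'])
  else String.ofList new_s

-- ===== PORT B =====
-- esc(p): p.rstrip('\\') ported by hand (exact) via reverse/dropWhile, then the doubled run.
def pvEsc (p : List Char) : List Char :=
  let stripped := (p.reverse.dropWhile (fun x => x == '\\')).reverse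
  stripped ++ List.replicate (2 * (p.length - stripped.length)) '\\'

-- s.split('"') ported by hand (exact for a one-character separator).
def pvSplit : List Char → List (List Char)
  | [] => [[]]
  | c :: t => if c = '"' then [] :: pvSplit t else
      match pvSplit t with
      | h :: r => (c :: h) :: r
      | [] => [[c]]

-- Literal port of Source B: split on '"', map esc+'\"' over all parts but the last, join, wrap.
def windows_shell_quote_py_alt (s : String) : String :=
  if s.toList = [] then "\"\"" else
  let parts := pvSplit s.toList
  let new_s := (parts.dropLast.map (fun p => pvEsc p ++ ['\\', '"'])).flatten ++ parts.getLastD []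
  if PySem.Chars.isIn [' '] new_s || PySem.Chars.isIn ['\t'] new_s then
    String.ofList ('"' :: new_s ++ ['"'])
  else String.ofList new_s

-- ===== PRECONDITION & SPEC =====
def Spec_windows_shell_quote_py (s : String) (out : String) : Prop := out = windows_shell_quote_py_alt s
instance (s : String) (out : String) : Decidable (Spec_windows_shell_quote_py s out) := by unfold Spec_windows_shell_quote_py; infer_instance

-- ===== CLAIM (what is proved, stated in full; the proofs are below) =====
def Claim_equal_windows_shell_quote_py : Prop := ∀ (s : String), Dom_windows_shell_quote_py s → Spec_windows_shell_quote_py s (windows_shell_quote_py s)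

-- ===== LEMMAS AND PROOFS =====

-- does the string start with a (possibly empty) backslash chain followed by a double quote?
def pvLeads : List Char → Bool
  | [] => false
  | c :: t => if c = '"' then true else if c = '\\' then pvLeads t else false

-- the common escaped form: each character's contribution, left to right
def pvG : List Char → List Char
  | [] => []
  | c :: t =>
    (if c = '"' then ['\\', '"']
     else if c = '\\' then (if pvLeads t then ['\\', '\\'] else ['\\'])
     else [c]) ++ pvG t

-- A's remaining computation on the rest of the string, with n pending backslashes
def pvFA : List Char → Nat → List Char
  | [], n => List.replicate n '\\'
  | c :: t, n =>
    if c = '\\' then pvFA t (n + 1)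
    else if c = '"' then List.replicate (n * 2) '\\' ++ ['\\', '"'] ++ pvFA t 0
    else List.replicate n '\\' ++ c :: pvFA t 0

theorem pv_join_nil (l : List (List Char)) : PySem.Chars.join [] l = l.flatten := by
  induction l with
  | nil => rfl
  | cons h t ih =>
    cases t with
    | nil => simp [PySem.Chars.join, List.intercalate]
    | cons h2 t2 =>
      simp only [PySem.Chars.join, List.intercalate, List.intersperse] at *
      simp [ih]

theorem pvFA_eq (cs : List Char) : ∀ n, pvFA cs n =
    List.replicate (n * (if pvLeads cs then 2 else 1)) '\\' ++ pvG cs := by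
  induction cs with
  | nil => intro n; simp [pvFA, pvG, pvLeads]
  | cons c t ih =>
    intro n
    by_cases hq : c = '"'
    · simp [pvFA, pvG, pvLeads, hq, ih 0]
    · by_cases hb : c = '\\'
      · simp only [pvFA, pvG, pvLeads, hb, if_neg (by decide : ¬ ('\\' = '"')), ih]
        by_cases hl : pvLeads t = true
        · rw [if_pos hl]
          simp only [hl, if_pos]
          rw [show (n + 1) * 2 = n * 2 + 2 from by ring, List.replicate_add]
          simp
        · simp [hl]
          rw [List.replicate_succ']
          simp
      · simp [pvFA, pvG, pvLeads, hq, hb, ih 0]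

theorem pvA_loop (cs : List Char) : ∀ (buff : List (List Char)) (n : Nat),
    (if (cs.foldl (fun (st : List (List Char) × Nat) c =>
      if c = '\\' then (st.1, st.2 + 1)
      else if c = '"' then
        ((if st.2 > 0 then st.1 ++ [List.replicate (st.2 * 2) '\\'] else st.1) ++ [['\\', '"']], 0)
      else
        ((if st.2 > 0 then st.1 ++ [List.replicate st.2 '\\'] else st.1) ++ [[c]], 0)) (buff, n)).2 > 0
     then (cs.foldl (fun (st : List (List Char) × Nat) c =>
      if c = '\\' then (st.1, st.2 + 1)
      else if c = '"' then
        ((if st.2 > 0 then st.1 ++ [List.replicate (st.2 * 2) '\\'] else st.1) ++ [['\\', '"']], 0)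
      else
        ((if st.2 > 0 then st.1 ++ [List.replicate st.2 '\\'] else st.1) ++ [[c]], 0)) (buff, n)).1
        ++ [List.replicate (cs.foldl (fun (st : List (List Char) × Nat) c =>
      if c = '\\' then (st.1, st.2 + 1)
      else if c = '"' then
        ((if st.2 > 0 then st.1 ++ [List.replicate (st.2 * 2) '\\'] else st.1) ++ [['\\', '"']], 0)
      else
        ((if st.2 > 0 then st.1 ++ [List.replicate st.2 '\\'] else st.1) ++ [[c]], 0)) (buff, n)).2 '\\']
     else (cs.foldl (fun (st : List (List Char) × Nat) c =>
      if c = '\\' then (st.1, st.2 + 1)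
      else if c = '"' then
        ((if st.2 > 0 then st.1 ++ [List.replicate (st.2 * 2) '\\'] else st.1) ++ [['\\', '"']], 0)
      else
        ((if st.2 > 0 then st.1 ++ [List.replicate st.2 '\\'] else st.1) ++ [[c]], 0)) (buff, n)).1).flatten
    = buff.flatten ++ pvFA cs n := by
  induction cs with
  | nil =>
    intro buff n
    cases n <;> simp [pvFA]
  | cons c t ih =>
    intro buff n
    by_cases hb : c = '\\'
    · simpa [hb, pvFA] using ih buff (n + 1)
    · by_cases hq : c = '"'
      · cases n <;> simp [hq, pvFA, ih]
      · cases n <;> simp [hb, hq, pvFA, ih]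

-- ----- B-side lemmas -----

def pvAllBS (l : List Char) : Bool := l.all (fun x => x == '\\')

def pvJoinEsc : List (List Char) → List Char
  | [] => []
  | [p] => p
  | p :: q :: r => pvEsc p ++ ['\\', '"'] ++ pvJoinEsc (q :: r)

theorem pvJoin_bridge (l : List (List Char)) :
    (l.dropLast.map (fun p => pvEsc p ++ ['\\', '"'])).flatten ++ l.getLastD [] = pvJoinEsc l := by
  induction l with
  | nil => rfl
  | cons p t ih =>
    cases t with
    | nil => simp [pvJoinEsc]
    | cons q r => simp [pvJoinEsc, ← ih]

theorem pvEsc_nil : pvEsc [] = [] := rfl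

theorem pvEsc_cons_ne (c : Char) (h : List Char) (hc : c ≠ '\\') :
    pvEsc (c :: h) = c :: pvEsc h := by
  have hpc : (fun x => x == '\\') c = false := by simpa using hc
  simp only [pvEsc, List.reverse_cons, List.dropWhile_append]
  by_cases he : (h.reverse.dropWhile (fun x => x == '\\')).isEmpty
  · rw [if_pos he]
    rw [List.isEmpty_iff] at he
    simp [List.dropWhile, hpc, he]
  · rw [if_neg he]
    have hle : (h.reverse.dropWhile (fun x => x == '\\')).length ≤ h.length := by
      simpa using List.length_dropWhile_le (fun x => x == '\\') h.reverse
    simp [Nat.succ_sub_succ]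

theorem pvEsc_all (h : List Char) (hall : pvAllBS h = true) :
    pvEsc h = List.replicate (2 * h.length) '\\' := by
  have : h.reverse.dropWhile (fun x => x == '\\') = [] := by
    rw [List.dropWhile_eq_nil_iff]
    intro x hx
    exact (List.all_eq_true.mp hall) x (List.mem_reverse.mp hx)
  simp [pvEsc, this]

theorem pvEsc_cons_bs_all (h : List Char) (hall : pvAllBS h = true) :
    pvEsc ('\\' :: h) = '\\' :: '\\' :: pvEsc h := by
  rw [pvEsc_all h hall, pvEsc_all ('\\' :: h) (by simpa [pvAllBS] using hall)]
  rw [show ('\\' :: h).length = h.length + 1 from rfl,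
    show 2 * (h.length + 1) = 2 + 2 * h.length from by ring, List.replicate_add]
  rfl

theorem pvEsc_cons_bs_not (h : List Char) (hnot : pvAllBS h = false) :
    pvEsc ('\\' :: h) = '\\' :: pvEsc h := by
  have hne : ¬ (h.reverse.dropWhile (fun x => x == '\\')).isEmpty := by
    rw [List.isEmpty_iff, List.dropWhile_eq_nil_iff]
    intro hc
    have : pvAllBS h = true := by
      rw [pvAllBS, List.all_eq_true]
      intro x hx
      exact hc x (List.mem_reverse.mpr hx)
    simp [this] at hnot
  have hle : (h.reverse.dropWhile (fun x => x == '\\')).length ≤ h.length := by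
    simpa using List.length_dropWhile_le (fun x => x == '\\') h.reverse
  simp only [pvEsc, List.reverse_cons, List.dropWhile_append, if_neg hne]
  simp [Nat.succ_sub_succ]

theorem pvSplit_ne_nil (t : List Char) : pvSplit t ≠ [] := by
  induction t with
  | nil => simp [pvSplit]
  | cons c u ih =>
    simp only [pvSplit]
    split
    · simp
    · cases hu : pvSplit u with
      | nil => simp
      | cons h r => simp

theorem pvMain (t : List Char) :
    pvJoinEsc (pvSplit t) = pvG t ∧
    (∀ h r, pvSplit t = h :: r → (pvLeads t = (!r.isEmpty && pvAllBS h)) ∧ (r = [] → h = t)) := by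
  induction t with
  | nil =>
    refine ⟨rfl, ?_⟩
    intro h r he
    simp [pvSplit] at he
    simp [he.1, he.2, pvLeads, pvAllBS]
  | cons c u ih =>
    obtain ⟨ih1, ih2⟩ := ih
    obtain ⟨h', r', hsplit⟩ := List.exists_cons_of_ne_nil (pvSplit_ne_nil u)
    by_cases hq : c = '"'
    · have hform : pvSplit (c :: u) = [] :: pvSplit u := by simp [pvSplit, hq]
      constructor
      · rw [hform, hsplit]
        show pvEsc [] ++ ['\\', '"'] ++ pvJoinEsc (h' :: r') = pvG (c :: u)
        rw [pvEsc_nil, ← hsplit, ih1]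
        simp [pvG, hq]
      · intro h r he
        rw [hform, hsplit] at he
        obtain ⟨he1, he2⟩ := List.cons.injEq _ _ _ _ ▸ he
        subst he1
        constructor
        · simp [pvLeads, hq, ← he2, pvAllBS]
        · intro hr; rw [← he2] at hr; simp at hr
    · have hform : pvSplit (c :: u) = (c :: h') :: r' := by
        simp [pvSplit, hq, hsplit]
      have hc2 : pvLeads u = (!r'.isEmpty && pvAllBS h') := (ih2 h' r' hsplit).1
      cases r' with
      | nil =>
        have hu : h' = u := (ih2 h' [] hsplit).2 rfl
        have hgu : pvG u = u := by
          rw [← ih1, hsplit, hu]; rfl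
        have hlu : pvLeads u = false := by simpa using hc2
        constructor
        · rw [hform]
          show c :: h' = pvG (c :: u)
          by_cases hb : c = '\\' <;> simp [pvG, hq, hb, hlu, hgu, hu]
        · intro h r he
          rw [hform] at he
          obtain ⟨he1, he2⟩ := List.cons.injEq _ _ _ _ ▸ he
          subst he1
          constructor
          · by_cases hb : c = '\\' <;> simp [pvLeads, hq, hb, hlu, ← he2]
          · intro _; rw [hu]
      | cons q r'' =>
        have hGu : pvEsc h' ++ ['\\', '"'] ++ pvJoinEsc (q :: r'') = pvG u := by
          rw [← ih1, hsplit]; rfl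
        have hlu : pvLeads u = pvAllBS h' := by simpa using hc2
        constructor
        · rw [hform]
          show pvEsc (c :: h') ++ ['\\', '"'] ++ pvJoinEsc (q :: r'') = pvG (c :: u)
          by_cases hb : c = '\\'
          · subst hb
            cases hall : pvAllBS h' with
            | true =>
              rw [pvEsc_cons_bs_all h' hall]
              simp only [pvG, hq, hlu, hall, if_pos]
              simp [← hGu]
            | false =>
              rw [pvEsc_cons_bs_not h' hall]
              simp only [pvG, hq, hlu, hall]
              simp [← hGu]
          · rw [pvEsc_cons_ne c h' hb]
            simp only [pvG, hq, hb]
            simp [← hGu]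
        · intro h r he
          rw [hform] at he
          obtain ⟨he1, he2⟩ := List.cons.injEq _ _ _ _ ▸ he
          subst he1
          constructor
          · by_cases hb : c = '\\'
            · subst hb
              simp [pvLeads, hq, hlu, ← he2, pvAllBS]
            · simp [pvLeads, hq, hb, ← he2, pvAllBS]
          · intro hr; rw [← he2] at hr; simp at hr
      
-- ===== VERDICT (by name: the statement is the Claim_ definition above) =====
theorem windows_shell_quote_py_spec : Claim_equal_windows_shell_quote_py := by
  intro s _
  unfold Spec_windows_shell_quote_py windows_shell_quote_py windows_shell_quote_py_alt
  by_cases h : s.toList = []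
  · simp [h]
  · rw [if_neg h, if_neg h]
    have hA := pvA_loop s.toList [] 0
    simp only [pv_join_nil]
    rw [hA, pvFA_eq, pvJoin_bridge, (pvMain s.toList).1]
    simp
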